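-- pv_equiv track=rewrite | github.com/thomasahle/konkurrence | fb/chap3/stack.py | bf2
-- ===== SOURCE A (Python) =====
-- from typing import List
--
-- def bf2(N: int, R: List[int], A: int, B: int) -> int:
--     import itertools
--     best = 10**12
--     for perm in itertools.combinations(range(1, max(R)+N), N):
--         price = sum(
--                    bool(p < r)*(r - p) * B + # Deflate down to p
--                    bool(p > r)*(p - r) * A   # Inflate up to p
--                    for r, p in zip(R, perm))
--         best = min(best, price)
--     return best
-- ===== SOURCE B (Python) =====
-- def _cost(R, A, B, i, v):
--     # cost of setting position i to value v
--     if i < len(R):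
--         r = R[i]
--         if v < r:
--             return (r - v) * B
--         if v > r:
--             return (v - r) * A
--     return 0
--
-- def bf2(N, R, A, B):
--     # DP over positions and candidate values with a running prefix minimum,
--     # O(N * (max(R)+N)) instead of enumerating all combinations.
--     if N == 0:
--         return 0
--     hi = max(R) + N - 1          # candidate values are 1..hi
--     if hi < N:
--         return 10**12            # no strictly increasing length-N sequence fits
--     prev = [0] * (hi + 1)        # prev[v] = min cost of first i positions, all values <= v
--     for i in range(N):
--         pm = [None]
--         run = None
--         for v, pv in enumerate(prev[:-1], start=1):
--             c = None if pv is None else pv + _cost(R, A, B, i, v)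
--             if c is not None and (run is None or c < run):
--                 run = c
--             pm.append(run)
--         prev = pm
--     return min(10**12, prev[hi])
-- ===== Notes on version B (the rewrite author's own statement) =====
-- stated objective: faster
-- what changed: Replaces exhaustive enumeration of all strictly increasing N-tuples from range(1, max(R)+N) (itertools.combinations) by a dynamic program over positions and candidate values with a running prefix minimum; intended as asymptotically faster (measured: A timed out at n=16 where B returned, so no ratio could be read at a common size).
import Mathlib
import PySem

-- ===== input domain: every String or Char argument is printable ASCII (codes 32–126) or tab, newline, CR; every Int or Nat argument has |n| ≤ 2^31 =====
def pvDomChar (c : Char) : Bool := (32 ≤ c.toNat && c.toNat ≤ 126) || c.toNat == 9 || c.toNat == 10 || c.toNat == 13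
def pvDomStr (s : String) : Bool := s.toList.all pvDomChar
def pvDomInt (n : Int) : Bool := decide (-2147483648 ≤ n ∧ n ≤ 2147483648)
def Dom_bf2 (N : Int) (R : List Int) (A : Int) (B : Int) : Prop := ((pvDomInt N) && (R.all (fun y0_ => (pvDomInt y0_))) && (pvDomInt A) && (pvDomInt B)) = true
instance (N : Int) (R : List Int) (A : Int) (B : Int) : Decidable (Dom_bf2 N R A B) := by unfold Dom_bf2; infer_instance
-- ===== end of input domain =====

-- B replaces A's exhaustive enumeration of all strictly increasing N-tuples by a
-- value-indexed dynamic program with a running prefix minimum (intended as faster;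
-- measured: A timed out at n=16 where B returned, so no same-size ratio was read).

-- ===== PORT A =====
-- itertools.combinations(xs, k) in lexicographic order (as lists)
def pvCombos : List Int → Nat → List (List Int)
  | _, 0 => [[]]
  | [], _ + 1 => []
  | x :: xs, k + 1 =>
    -- itertools.combinations(pool, r) yields nothing at all when r > len(pool)
    if xs.length < k then []
    else (pvCombos xs k).map (fun c => x :: c) ++ pvCombos xs (k + 1)
termination_by xs k => xs.length

-- bool(p < r)*(r - p)*B + bool(p > r)*(p - r)*A
def pvPairCost (A B r p : Int) : Int :=
  (if p < r then 1 else 0) * (r - p) * B + (if p > r then 1 else 0) * (p - r) * A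

-- sum(... for r, p in zip(R, perm))
def pvPriceA (A B : Int) : List Int → List Int → Int
  | r :: rs, p :: ps => pvPairCost A B r p + pvPriceA A B rs ps
  | _, _ => 0

def bf2 (N : Int) (R : List Int) (A : Int) (B : Int) : Int :=
  -- max(R); the `none` default is unreachable under Pre_ (max([]) raises ValueError)
  let mx : Int := match PySem.List.max? R (fun y => y) with | some m => m | none => 0
  (pvCombos (PySem.List.pyRange 1 (mx + N) 1) N.toNat).foldl
    (fun best perm => min best (pvPriceA A B R perm)) (10 ^ 12)

-- ===== PORT B =====
-- _cost(R, A, B, i, v)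
def pvCost (R : List Int) (A B : Int) (i : Nat) (v : Int) : Int :=
  match R[i]? with
  | some r => if v < r then (r - v) * B else if v > r then (v - r) * A else 0
  | none => 0

-- `if c is not None and (run is None or c < run): run = c`
def pvRun (run c : Option Int) : Option Int :=
  match c with
  | none => run
  | some cv =>
    match run with
    | none => some cv
    | some r => if cv < r then some cv else some r

-- `for v, pv in enumerate(prev[:-1], start=1): ... pm.append(run)`
def pvInner (co : Int → Int) : List (Option Int) → Option Int → Int → List (Option Int)
  | [], _, _ => []
  | pv :: ps, run, v =>
    let c := pv.map (fun x => x + co v)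
    let run' := pvRun run c
    run' :: pvInner co ps run' (v + 1)

-- one iteration of `for i in range(N)`: pm = [None]; inner loop; prev = pm
def pvStep (R : List Int) (A B : Int) (prev : List (Option Int)) (i : Nat) : List (Option Int) :=
  none :: pvInner (pvCost R A B i) prev.dropLast none 1

def bf2_alt (N : Int) (R : List Int) (A : Int) (B : Int) : Int :=
  if N = 0 then 0
  else
    let mx : Int := match PySem.List.max? R (fun y => y) with | some m => m | none => 0
    let hi : Int := mx + N - 1
    if hi < N then 10 ^ 12
    else
      let prev0 : List (Option Int) := List.replicate (hi + 1).toNat (some 0)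
      let prev := (List.range N.toNat).foldl (pvStep R A B) prev0
      -- min(10**12, prev[hi]); under Pre_ prev[hi] is always a present integer
      match PySem.List.pyGet? prev hi with
      | some (some m) => min (10 ^ 12) m
      | _ => 10 ^ 12

-- ===== PRECONDITION & SPEC =====
-- Pre_ excludes exactly where A raises: max([]) raises ValueError, and
-- itertools.combinations with negative N raises ValueError.
def Pre_bf2 (N : Int) (R : List Int) (A : Int) (B : Int) : Prop := R ≠ [] ∧ 0 ≤ N
instance (N : Int) (R : List Int) (A : Int) (B : Int) : Decidable (Pre_bf2 N R A B) := by
  unfold Pre_bf2; infer_instance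

def pvWitness_bf2 : Int × List Int × Int × Int := (2, [3, 1], 2, 5)

def Spec_bf2 (N : Int) (R : List Int) (A : Int) (B : Int) (out : Int) : Prop := out = bf2_alt N R A B
instance (N : Int) (R : List Int) (A : Int) (B : Int) (out : Int) : Decidable (Spec_bf2 N R A B out) := by
  unfold Spec_bf2; infer_instance

-- ===== CLAIM (what is proved, stated in full; the proofs are below) =====
def Claim_equal_bf2 : Prop := ∀ (N : Int) (R : List Int) (A : Int) (B : Int),
  Dom_bf2 N R A B → Pre_bf2 N R A B → Spec_bf2 N R A B (bf2 N R A B)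

-- ===== LEMMAS AND PROOFS =====

-- the same enumeration without the emptiness short-cut (proof-side only)
def pvCombosU : List Int → Nat → List (List Int)
  | _, 0 => [[]]
  | [], _ + 1 => []
  | x :: xs, k + 1 => (pvCombosU xs k).map (fun c => x :: c) ++ pvCombosU xs (k + 1)
termination_by xs k => xs.length

-- Option Int viewed in WithTop Int (none = +∞, the "no feasible sequence" value)
def toW : Option Int → WithTop Int
  | none => ⊤
  | some a => (a : WithTop Int)

-- minimum of a list of prices, ⊤ if empty
def lmin (l : List Int) : WithTop Int := l.foldr (fun x acc => min (↑x) acc) ⊤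

-- pvM c i v = min cost of a strictly increasing length-i sequence with values in 1..v
def pvM (c : Nat → Int → Int) : Nat → Nat → WithTop Int
  | 0, _ => (0 : WithTop Int)
  | _ + 1, 0 => ⊤
  | i + 1, v + 1 => min (pvM c (i + 1) v) (pvM c i v + ↑(c i ((v : Int) + 1)))
termination_by i v => (i, v)

theorem lmin_nil : lmin [] = ⊤ := rfl
theorem lmin_cons (x : Int) (l : List Int) : lmin (x :: l) = min ↑x (lmin l) := rfl

theorem lmin_append (l1 l2 : List Int) : lmin (l1 ++ l2) = min (lmin l1) (lmin l2) := by
  induction l1 with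
  | nil => simp [lmin_nil]
  | cons x xs ih => simp [lmin_cons, ih, min_assoc]

theorem min_add_coe (a b : WithTop Int) (d : Int) :
    min a b + (d : WithTop Int) = min (a + d) (b + d) := by
  cases a with
  | top => simp
  | coe a =>
    cases b with
    | top => simp
    | coe b =>
      rw [← WithTop.coe_min, ← WithTop.coe_add, ← WithTop.coe_add, ← WithTop.coe_add,
        ← WithTop.coe_min, min_add_add_right]

theorem lmin_map_add (l : List (List Int)) (g : List Int → Int) (d : Int) :
    lmin (l.map (fun p => g p + d)) = lmin (l.map g) + (d : WithTop Int) := by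
  induction l with
  | nil => simp [lmin_nil]
  | cons x xs ih => simp [lmin_cons, ih, min_add_coe, WithTop.coe_add]

theorem foldl_min_coe (f : List Int → Int) (l : List (List Int)) (b : Int) :
    ((l.foldl (fun best p => min best (f p)) b : Int) : WithTop Int) = min (↑b) (lmin (l.map f)) := by
  induction l generalizing b with
  | nil => simp [lmin_nil]
  | cons x xs ih => simp [lmin_cons, ih, min_assoc]

theorem pvPriceA_nil (A B : Int) (R : List Int) : pvPriceA A B R [] = 0 := by
  cases R <;> rfl

theorem pvPriceA_snoc (A B : Int) (p : List Int) :
    ∀ (R : List Int) (x : Int),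
      pvPriceA A B R (p ++ [x]) = pvPriceA A B R p + pvCost R A B p.length x := by
  induction p with
  | nil =>
    intro R x
    cases R with
    | nil => simp [pvPriceA, pvCost]
    | cons r rs =>
      simp only [List.nil_append, pvPriceA, pvPriceA_nil, pvCost, pvPairCost]
      rcases lt_trichotomy x r with h | h | h <;>
        simp [h, not_lt_of_gt] <;> ring_nf
  | cons q qs ih =>
    intro R x
    cases R with
    | nil => simp [pvPriceA, pvCost]
    | cons r rs =>
      simp only [List.cons_append, pvPriceA, ih rs x, pvCost, List.length_cons]
      have : (r :: rs)[qs.length + 1]? = rs[qs.length]? := by simp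
      rw [this]
      ring

theorem length_of_mem_combos : ∀ (xs : List Int) (k : Nat) (c : List Int),
    c ∈ pvCombosU xs k → c.length = k := by
  intro xs
  induction xs with
  | nil =>
    intro k c hc
    cases k with
    | zero => simp [pvCombosU] at hc; simp [hc]
    | succ k => simp [pvCombosU] at hc
  | cons x xs ih =>
    intro k c hc
    cases k with
    | zero => simp [pvCombosU] at hc; simp [hc]
    | succ k =>
      simp only [pvCombosU, List.mem_append, List.mem_map] at hc
      rcases hc with ⟨c', hc', rfl⟩ | hc
      · simp [ih k c' hc']
      · exact ih (k + 1) c hc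

theorem combosU_nil_of_lt : ∀ (xs : List Int) (k : Nat), xs.length < k → pvCombosU xs k = [] := by
  intro xs
  induction xs with
  | nil => intro k hk; cases k with
    | zero => omega
    | succ k => simp [pvCombosU]
  | cons x xs ih =>
    intro k hk
    cases k with
    | zero => omega
    | succ k =>
      simp only [pvCombosU]
      rw [ih k (by simp at hk; omega), ih (k + 1) (by simp at hk; omega)]
      simp

theorem pvCombos_eq_U : ∀ (xs : List Int) (k : Nat), pvCombos xs k = pvCombosU xs k := by
  intro xs
  induction xs with
  | nil => intro k; cases k <;> simp [pvCombos, pvCombosU]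
  | cons x xs ih =>
    intro k
    cases k with
    | zero => simp [pvCombos, pvCombosU]
    | succ k =>
      simp only [pvCombos, pvCombosU]
      split_ifs with hk
      · rw [combosU_nil_of_lt xs k (by omega), combosU_nil_of_lt xs (k + 1) (by simp; omega)]
        simp
      · rw [ih k, ih (k + 1)]

theorem lmin_combos_snoc : ∀ (l : List Int) (k : Nat) (x : Int) (f : List Int → Int),
    lmin ((pvCombosU (l ++ [x]) (k + 1)).map f) =
      min (lmin ((pvCombosU l (k + 1)).map f))
          (lmin ((pvCombosU l k).map (fun c => f (c ++ [x])))) := by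
  intro l
  induction l with
  | nil =>
    intro k x f
    cases k <;> simp [pvCombosU, lmin_nil, lmin_cons]
  | cons y l ih =>
    intro k x f
    simp only [List.cons_append, pvCombosU, List.map_append, lmin_append, List.map_map,
      Function.comp_def]
    cases k with
    | zero =>
      rw [ih 0 x f]
      simp [pvCombosU, lmin_cons, lmin_nil, min_assoc, min_comm, min_left_comm]
    | succ k =>
      rw [ih (k + 1) x f, ih k x (fun c => f (y :: c))]
      simp only [pvCombosU, List.map_append, lmin_append, List.map_map, Function.comp_def]
      simp [min_assoc, min_comm, min_left_comm]

theorem lmin_combos_range (R : List Int) (A B : Int) :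
    ∀ (v i : Nat),
      lmin ((pvCombosU (PySem.List.pyRange 1 ((v : Int) + 1) 1) i).map (pvPriceA A B R)) =
        pvM (pvCost R A B) i v := by
  intro v
  induction v with
  | zero =>
    intro i
    rw [PySem.List.pyRange_one_eq_nil (by norm_num)]
    cases i with
    | zero => simp [pvCombosU, pvM, lmin_cons, lmin_nil, pvPriceA_nil]
    | succ i => simp [pvCombosU, pvM, lmin_nil]
  | succ v ih =>
    intro i
    have hsplit : PySem.List.pyRange 1 ((↑(v + 1) : Int) + 1) 1 =
        PySem.List.pyRange 1 ((v : Int) + 1) 1 ++ [(v : Int) + 1] := by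
      push_cast
      rw [PySem.List.pyRange_one_succ_right (by omega)]
    rw [hsplit]
    cases i with
    | zero => simp [pvCombosU, pvM, lmin_cons, lmin_nil, pvPriceA_nil]
    | succ i =>
      rw [lmin_combos_snoc]
      have hmap : (pvCombosU (PySem.List.pyRange 1 ((v : Int) + 1) 1) i).map
            (fun c => pvPriceA A B R (c ++ [(v : Int) + 1])) =
          (pvCombosU (PySem.List.pyRange 1 ((v : Int) + 1) 1) i).map
            (fun c => pvPriceA A B R c + pvCost R A B i ((v : Int) + 1)) := by
        apply List.map_congr_left
        intro c hc
        rw [pvPriceA_snoc, length_of_mem_combos _ i c hc]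
      rw [hmap, lmin_map_add, ih (i + 1), ih i]
      simp [pvM]

-- properties of the port-B primitives
theorem toW_pvRun (run c : Option Int) : toW (pvRun run c) = min (toW run) (toW c) := by
  cases run <;> cases c <;>
    simp [pvRun, toW, min_def] <;> split_ifs <;> first | rfl | omega

theorem toW_map_add (pv : Option Int) (d : Int) :
    toW (pv.map (fun x => x + d)) = toW pv + (d : WithTop Int) := by
  cases pv <;> simp [toW, WithTop.coe_add]

theorem inner_spec (co : Int → Int) (P Q : Nat → WithTop Int)
    (hQ : ∀ v : Nat, Q (v + 1) = min (Q v) (P v + ↑(co ((v : Int) + 1)))) :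
    ∀ (k : Nat) (l : List (Option Int)) (run : Option Int) (v₀ : Nat),
      l.map toW = (List.range k).map (fun j => P (v₀ + j)) →
      toW run = Q v₀ →
      (pvInner co l run ((v₀ : Int) + 1)).map toW = (List.range k).map (fun j => Q (v₀ + 1 + j)) := by
  intro k
  induction k with
  | zero =>
    intro l run v₀ hl _
    have : l = [] := by simpa using congrArg List.length hl
    subst this; rfl
  | succ k ih =>
    intro l run v₀ hl hrun
    cases l with
    | nil => simp at hl
    | cons pv ps =>
      rw [List.range_succ_eq_map] at hl
      simp only [List.map_cons, List.map_map, List.cons.injEq] at hl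
      obtain ⟨hpv, hps⟩ := hl
      have hrun' : toW (pvRun run (pv.map (fun x => x + co ((v₀ : Int) + 1)))) = Q (v₀ + 1) := by
        rw [toW_pvRun, toW_map_add, hpv, hrun, hQ v₀]
        simp
      simp only [pvInner, List.map_cons]
      rw [List.range_succ_eq_map]
      simp only [List.map_cons, List.map_map, List.cons.injEq]
      refine ⟨by simpa using hrun', ?_⟩
      have hps' : List.map toW ps = (List.range k).map (fun j => P ((v₀ + 1) + j)) := by
        rw [hps]
        apply List.map_congr_left
        intro j hj
        simp only [Function.comp_def]
        congr 1
        omega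
      have hcast : ((v₀ : Int) + 1 + 1) = (((v₀ + 1 : Nat)) : Int) + 1 := by push_cast; ring
      rw [hcast, ih ps _ (v₀ + 1) hps' hrun']
      apply List.map_congr_left
      intro j hj
      simp only [Function.comp_def]
      congr 1
      omega

-- row invariant for one outer iteration
theorem step_row (R : List Int) (A B : Int) (n i : Nat) (prev : List (Option Int))
    (h : prev.map toW = (List.range (n + 1)).map (fun v => pvM (pvCost R A B) i v)) :
    (pvStep R A B prev i).map toW =
      (List.range (n + 1)).map (fun v => pvM (pvCost R A B) (i + 1) v) := by
  have hdrop : prev.dropLast.map toW = (List.range n).map (fun j => pvM (pvCost R A B) i (0 + j)) := by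
    rw [List.map_dropLast, h, List.range_succ, List.map_append]
    simp only [List.map_cons, List.map_nil, List.dropLast_concat]
    apply List.map_congr_left
    intro j hj
    rw [Nat.zero_add]
  have hrun : toW none = pvM (pvCost R A B) (i + 1) 0 := by simp [toW, pvM]
  have hQ : ∀ v : Nat, pvM (pvCost R A B) (i + 1) (v + 1) =
      min (pvM (pvCost R A B) (i + 1) v)
          (pvM (pvCost R A B) i v + ↑(pvCost R A B i ((v : Int) + 1))) := by
    intro v; simp [pvM]
  have hinner := inner_spec (pvCost R A B i) (pvM (pvCost R A B) i) (pvM (pvCost R A B) (i + 1))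
    hQ n prev.dropLast none 0 hdrop hrun
  simp only [Nat.cast_zero, zero_add] at hinner
  simp only [pvStep, List.map_cons, hinner]
  rw [List.range_succ_eq_map]
  simp only [List.map_cons, List.map_map, List.cons.injEq]
  refine ⟨hrun, ?_⟩
  apply List.map_congr_left
  intro j hj
  simp only [Function.comp_def]
  congr 1
  omega

theorem fold_rows (R : List Int) (A B : Int) (n : Nat) :
    ∀ (m : Nat),
      (((List.range m).foldl (pvStep R A B) (List.replicate (n + 1) (some 0))).map toW) =
        (List.range (n + 1)).map (fun v => pvM (pvCost R A B) m v) := by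
  intro m
  induction m with
  | zero =>
    simp only [List.range_zero, List.foldl_nil, List.map_replicate]
    have : ∀ v : Nat, pvM (pvCost R A B) 0 v = (0 : WithTop Int) := fun v => by simp [pvM]
    simp [toW, this, List.map_const']
  | succ m ih =>
    rw [List.range_succ, List.foldl_append, List.foldl_cons, List.foldl_nil]
    exact step_row R A B n m _ ih

-- ===== VERDICT (by name: the statement is the Claim_ definition above) =====
theorem bf2_spec : Claim_equal_bf2 := by
  intro N R A B _ hpre
  obtain ⟨hR, hN⟩ := hpre
  unfold Spec_bf2
  simp only [bf2, bf2_alt, pvCombos_eq_U]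
  set mx : Int := (match PySem.List.max? R (fun y => y) with | some m => m | none => 0) with hmx
  by_cases h0 : N = 0
  · subst h0
    simp only [Int.toNat_zero, pvCombosU, List.foldl_cons, List.foldl_nil,
      pvPriceA_nil]
    norm_num
  · rw [if_neg h0]
    by_cases hlt : mx + N - 1 < N
    · rw [if_pos hlt]
      have hlen : (PySem.List.pyRange 1 (mx + N) 1).length < N.toNat := by
        rw [PySem.List.length_pyRange_one]; omega
      rw [combosU_nil_of_lt _ _ hlen]
      simp
    · rw [if_neg hlt]
      have hN1 : 1 ≤ N := by omega
      set hi := mx + N - 1 with hhidef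
      set n := hi.toNat with hndef
      have hin : (n : Int) = hi := Int.toNat_of_nonneg (by omega)
      have hn1 : (hi + 1).toNat = n + 1 := by omega
      have hrow := fold_rows R A B n N.toNat
      rw [hn1] at *
      set prev := (List.range N.toNat).foldl (pvStep R A B) (List.replicate (n + 1) (some 0))
        with hprev
      have hlenprev : prev.length = n + 1 := by
        have := congrArg List.length hrow
        simpa using this
      have hget : PySem.List.pyGet? prev hi = prev[n]? := by
        have h1 : PySem.List.pyGet? prev hi = prev[hi.toNat]? :=
          PySem.List.pyGet?_of_nonneg prev (by omega)
        rw [h1]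
      have hn_lt : n < prev.length := by omega
      have hentry : toW prev[n] = pvM (pvCost R A B) N.toNat n := by
        have := congrArg (fun t => t[n]?) hrow
        simp only [List.getElem?_map] at this
        rw [List.getElem?_eq_getElem hn_lt] at this
        rw [List.getElem?_eq_getElem (by simp)] at this
        simp only [Option.map_some, Option.some.injEq, List.getElem_range] at this
        exact this
      have hA : ((pvCombosU (PySem.List.pyRange 1 (mx + N) 1) N.toNat).foldl
            (fun best perm => min best (pvPriceA A B R perm)) (10 ^ 12) : Int) =
          (match prev[n]? with
            | some (some m) => min (10 ^ 12) m
            | _ => (10 ^ 12 : Int)) := by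
        apply WithTop.coe_injective
        rw [foldl_min_coe]
        have hrange : mx + N = (n : Int) + 1 := by omega
        rw [hrange, lmin_combos_range R A B n N.toNat]
        rw [List.getElem?_eq_getElem hn_lt]
        cases heq : prev[n] with
        | none =>
          rw [heq] at hentry
          simp only [toW] at hentry
          rw [← hentry]
          simp
        | some m =>
          rw [heq] at hentry
          simp only [toW] at hentry
          rw [← hentry]
          simp
      rw [hget]
      exact hA
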